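-- pv_equiv track=rewrite | github.com/S6F6/Maktab | hw-02/market.py | count_sells_per_product
-- ===== SOURCE A (Python) =====
-- def count_sells_per_product(data:list):
--     product_dict = {}
--     for item in data:
--         if product_dict.get(item[0]) is None:
--             product_dict[item[0]] = item[2]
--         else:
--             product_dict[item[0]] += item[2]
--
--     return product_dict
-- ===== SOURCE B (Python) =====
-- def count_sells_per_product(data: list):
--     keys = list(dict.fromkeys(item[0] for item in data))
--     return {k: sum(item[2] for item in data if item[0] == k) for k in keys}
-- ===== Notes on version B (the rewrite author's own statement) =====
-- stated objective: alternative
-- what changed: Replaces the single accumulating dict pass with a distinct-keys pass (dict.fromkeys) followed by an independent summation scan over the data per product key.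
import Mathlib
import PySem

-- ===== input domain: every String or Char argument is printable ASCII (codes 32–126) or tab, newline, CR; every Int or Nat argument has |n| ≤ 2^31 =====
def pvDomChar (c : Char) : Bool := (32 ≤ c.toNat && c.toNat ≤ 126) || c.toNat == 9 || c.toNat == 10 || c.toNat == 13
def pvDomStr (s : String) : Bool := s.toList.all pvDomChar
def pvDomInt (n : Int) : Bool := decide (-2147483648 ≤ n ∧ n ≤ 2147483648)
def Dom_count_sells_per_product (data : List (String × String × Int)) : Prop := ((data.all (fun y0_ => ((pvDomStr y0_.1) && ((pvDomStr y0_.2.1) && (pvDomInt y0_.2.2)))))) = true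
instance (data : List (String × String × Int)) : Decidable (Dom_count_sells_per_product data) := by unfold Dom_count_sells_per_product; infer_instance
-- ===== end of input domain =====

-- B replaces A's single accumulating-dict pass by a distinct-keys pass followed by one
-- summation scan over the data per product key (alternative decomposition, not faster).

-- ===== PORT A =====
def count_sells_per_product (data : List (String × String × Int)) : List (String × Int) :=
  (data.foldl (fun d item =>
      match d.get? item.1 with
      | none => d.insert item.1 item.2.2
      | some v => d.insert item.1 (v + item.2.2))
    PySem.Dict.empty).items

-- ===== PORT B =====
-- keys = list(dict.fromkeys(...)) is PySem.List.dedup; the dict comprehension over these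
-- DISTINCT keys (insertion order) is exactly this map, giving the dict's items list.
def count_sells_per_product_alt (data : List (String × String × Int)) : List (String × Int) :=
  (PySem.List.dedup (data.map (·.1))).map
    (fun k => (k, ((data.filter (fun item => item.1 == k)).map (·.2.2)).sum))

-- ===== PRECONDITION & SPEC =====
def Spec_count_sells_per_product (data : List (String × String × Int)) (out : List (String × Int)) : Prop := out = count_sells_per_product_alt data
instance (data : List (String × String × Int)) (out : List (String × Int)) : Decidable (Spec_count_sells_per_product data out) := by unfold Spec_count_sells_per_product; infer_instance

-- ===== CLAIM (what is proved, stated in full; the proofs are below) =====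
def Claim_equal_count_sells_per_product : Prop := ∀ (data : List (String × String × Int)), Dom_count_sells_per_product data → Spec_count_sells_per_product data (count_sells_per_product data)

-- ===== LEMMAS AND PROOFS =====

-- A's loop body, named for the proofs.
def pvStepA (d : PySem.Dict String Int) (item : String × String × Int) : PySem.Dict String Int :=
  match d.get? item.1 with
  | none => d.insert item.1 item.2.2
  | some v => d.insert item.1 (v + item.2.2)

-- per-key sum over a data list
def pvGsum (k : String) (data : List (String × String × Int)) : Int :=
  ((data.filter (fun item => item.1 == k)).map (·.2.2)).sum

lemma pvGsum_append_singleton (k : String) (xs : List (String × String × Int)) (a : String × String × Int) :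
    pvGsum k (xs ++ [a]) = pvGsum k xs + (if a.1 = k then a.2.2 else 0) := by
  simp [pvGsum, List.filter_append]
  by_cases h : a.1 = k <;> simp [h]

lemma pvDedup_append_singleton (xs : List String) (x : String) :
    PySem.List.dedup (xs ++ [x]) = if x ∈ xs then PySem.List.dedup xs else PySem.List.dedup xs ++ [x] := by
  simp only [PySem.List.dedup_eq_ofList, PySem.Set.ofList_eq_foldl, List.foldl_append, List.foldl]
  simp only [PySem.Set.add, PySem.Set.contains, ← PySem.Set.ofList_eq_foldl]
  by_cases h : x ∈ xs <;> simp [h, PySem.Set.mem_ofList]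

-- the invariant of A's loop: the dict's items are B's list
lemma pvFoldA_items (data : List (String × String × Int)) :
    (data.foldl pvStepA PySem.Dict.empty).items
      = (PySem.List.dedup (data.map (·.1))).map (fun k => (k, pvGsum k data)) := by
  induction data using List.reverseRecOn with
  | nil => rfl
  | append_singleton xs a ih =>
    have hnodup : (PySem.List.dedup (xs.map (·.1))).Nodup := PySem.List.nodup_dedup _
    have hkeys : (xs.foldl pvStepA PySem.Dict.empty).keys = PySem.List.dedup (xs.map (·.1)) := by
      show ((xs.foldl pvStepA PySem.Dict.empty).items.map (·.1)) = _
      rw [ih]; simp [Function.comp_def]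
    have hknodup : (xs.foldl pvStepA PySem.Dict.empty).keys.Nodup := by rw [hkeys]; exact hnodup
    rw [List.foldl_append]
    simp only [List.foldl_cons, List.foldl_nil, List.map_append, List.map_cons, List.map_nil]
    rw [pvDedup_append_singleton]
    by_cases hm : a.1 ∈ xs.map (·.1)
    · -- key already present: get? = some (pvGsum a.1 xs), insert overwrites in place
      have hmem : (a.1, pvGsum a.1 xs) ∈ (xs.foldl pvStepA PySem.Dict.empty).items := by
        rw [ih]; exact List.mem_map.mpr ⟨a.1, by simp [hm], rfl⟩
      have hget : (xs.foldl pvStepA PySem.Dict.empty).get? a.1 = some (pvGsum a.1 xs) :=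
        PySem.Dict.get?_of_mem_items _ hmem hknodup
      have hcont : (xs.foldl pvStepA PySem.Dict.empty).contains a.1 = true := by
        rw [PySem.Dict.contains_eq_isSome_get?, hget]; rfl
      simp only [pvStepA, hget]
      rw [PySem.Dict.items_insert_of_contains _ _ hcont, ih, List.map_map]
      simp only [if_pos hm]
      apply List.map_congr_left
      intro k hk
      by_cases hka : k = a.1
      · subst hka
        simp [pvGsum_append_singleton]
      · have hak : ¬ (a.1 = k) := fun h => hka h.symm
        simp [hka, hak, pvGsum_append_singleton]
    · -- new key: appended at the end
      have hget : (xs.foldl pvStepA PySem.Dict.empty).get? a.1 = none := by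
        rw [PySem.Dict.get?_eq_none_iff_not_mem_keys, hkeys]
        simp [hm]
      simp only [pvStepA, hget]
      have hcont : (xs.foldl pvStepA PySem.Dict.empty).contains a.1 = false := by
        rw [PySem.Dict.contains_eq_isSome_get?, hget]; rfl
      rw [PySem.Dict.items_insert_of_not_contains _ _ hcont, ih]
      simp only [if_neg hm, List.map_append, List.map_cons, List.map_nil]
      congr 1
      · apply List.map_congr_left
        intro k hk
        have hka : ¬ (a.1 = k) := by
          intro h; exact hm (h ▸ (by
            have : k ∈ PySem.List.dedup (xs.map (·.1)) := hk
            rw [PySem.List.mem_dedup] at this; exact this))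
        simp [pvGsum_append_singleton, hka]
      · have h0 : pvGsum a.1 xs = 0 := by
          have : xs.filter (fun item => item.1 == a.1) = [] := by
            apply List.filter_eq_nil_iff.mpr
            intro p hp hbeq
            exact hm (List.mem_map.mpr ⟨p, hp, by simpa using hbeq⟩)
          simp [pvGsum, this]
        simp [pvGsum_append_singleton, h0]

-- ===== VERDICT (by name: the statement is the Claim_ definition above) =====
theorem count_sells_per_product_spec : Claim_equal_count_sells_per_product := by
  intro data _
  show count_sells_per_product data = count_sells_per_product_alt data
  have := pvFoldA_items data
  simpa [count_sells_per_product, count_sells_per_product_alt, pvStepA, pvGsum] using this
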